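-- pv_equiv track=rewrite | github.com/lk488/lk488.github.io | pdf_to_html_converter_tool/txt_and_dict_to_html.py | format_section_to_html
-- ===== SOURCE A (Python) =====
-- def format_section_to_html(original_section):
--     paragraphs = original_section.split('\n\n')
--
--     html_section = ""
--
--     for i,paragraph in enumerate(paragraphs):
--         if i < len(paragraphs)-1: end = '\n'
--         else: end = ''
--         html_section += "<p>" + paragraph + "</p>"+end
--
--     return html_section
-- ===== SOURCE B (Python) =====
-- def format_section_to_html(original_section):
--     return "<p>" + original_section.replace('\n\n', '</p>\n<p>') + "</p>"
-- ===== Notes on version B (the rewrite author's own statement) =====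
-- stated objective: simpler
-- what changed: B replaces the split-into-paragraphs list, the enumerate loop and the last-element branch with a single in-place substitution of each '\n\n' delimiter by '</p>\n<p>' between fixed outer tags.
import Mathlib
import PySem

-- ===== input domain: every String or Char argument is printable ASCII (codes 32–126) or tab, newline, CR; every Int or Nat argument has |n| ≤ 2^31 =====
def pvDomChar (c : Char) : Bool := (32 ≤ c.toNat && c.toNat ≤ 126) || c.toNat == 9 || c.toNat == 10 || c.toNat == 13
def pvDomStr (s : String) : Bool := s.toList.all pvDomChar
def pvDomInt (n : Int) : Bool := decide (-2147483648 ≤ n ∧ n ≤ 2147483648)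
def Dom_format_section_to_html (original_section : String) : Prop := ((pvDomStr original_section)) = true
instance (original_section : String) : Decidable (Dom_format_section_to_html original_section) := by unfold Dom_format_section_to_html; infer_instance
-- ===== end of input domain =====

-- B replaces A's split/enumerate/reassemble loop by one in-place substitution of each '\n\n'
-- delimiter between fixed outer tags (simpler; same result).

-- ===== PORT A =====
def format_section_to_html (original_section : String) : String :=
  let paragraphs := (PySem.Str.split? original_section "\n\n").getD []
  (PySem.List.enumerate paragraphs).foldl
    (fun html_section ip =>
      let e := if ip.1 < (paragraphs.length : Int) - 1 then "\n" else ""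
      html_section ++ ("<p>" ++ ip.2 ++ "</p>" ++ e)) ""

-- ===== PORT B =====
def format_section_to_html_alt (original_section : String) : String :=
  "<p>" ++ PySem.Str.replace original_section "\n\n" "</p>\n<p>" ++ "</p>"

-- ===== PRECONDITION & SPEC =====
def Spec_format_section_to_html (original_section : String) (out : String) : Prop := out = format_section_to_html_alt original_section
instance (original_section : String) (out : String) : Decidable (Spec_format_section_to_html original_section out) := by unfold Spec_format_section_to_html; infer_instance

-- ===== CLAIM (what is proved, stated in full; the proofs are below) =====
def Claim_equal_format_section_to_html : Prop := ∀ (original_section : String), Dom_format_section_to_html original_section → Spec_format_section_to_html original_section (format_section_to_html original_section)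

-- ===== LEMMAS AND PROOFS =====

-- sp c0 sep l = Python l.split(c0 :: sep) (a structural reference version of PySem.Chars.splitOn)
def sp (c0 : Char) (sep : List Char) : List Char → List (List Char)
  | [] => [[]]
  | c :: rest =>
    if (c0 :: sep).isPrefixOf (c :: rest) then
      [] :: sp c0 sep (List.drop sep.length rest)
    else (sp c0 sep rest).modifyHead (c :: ·)
termination_by l => l.length
decreasing_by
  all_goals simp

theorem sp_ne_nil (c0 : Char) (sep : List Char) (l : List Char) : sp c0 sep l ≠ [] := by
  induction l using sp.induct c0 sep with
  | case1 => simp [sp]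
  | case2 c rest h ih => simp [sp, h]
  | case3 c rest h ih =>
    simp only [sp, if_neg h]
    cases hsp : sp c0 sep rest with
    | nil => exact absurd hsp ih
    | cons a t => simp [List.modifyHead]

theorem splitOn_go_eq (c0 : Char) (sep : List Char) :
    ∀ (fuel : Nat) (l cur : List Char) (acc : List (List Char)), l.length < fuel →
    PySem.Chars.splitOn.go (c0 :: sep) fuel l cur acc
      = acc.reverse ++ (sp c0 sep l).modifyHead (fun x => cur.reverse ++ x) := by
  intro fuel
  induction fuel with
  | zero => intro l cur acc h; omega
  | succ f ih =>
    intro l cur acc h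
    cases l with
    | nil => simp [PySem.Chars.splitOn.go, sp, List.modifyHead]
    | cons c rest =>
      by_cases hp : (c0 :: sep).isPrefixOf (c :: rest) = true
      · rw [PySem.Chars.splitOn.go, if_pos hp]
        rw [ih _ _ _ (by simp at h ⊢; omega)]
        obtain ⟨a, t, hsp⟩ : ∃ a t, sp c0 sep (List.drop sep.length rest) = a :: t := by
          cases hh : sp c0 sep (List.drop sep.length rest) with
          | nil => exact absurd hh (sp_ne_nil c0 sep _)
          | cons a t => exact ⟨a, t, rfl⟩
        simp [sp, hp, hsp, List.modifyHead]
      · rw [PySem.Chars.splitOn.go, if_neg hp]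
        rw [ih _ _ _ (by simp at h ⊢; omega)]
        obtain ⟨a, t, hsp⟩ : ∃ a t, sp c0 sep rest = a :: t := by
          cases hh : sp c0 sep rest with
          | nil => exact absurd hh (sp_ne_nil c0 sep rest)
          | cons a t => exact ⟨a, t, rfl⟩
        simp [sp, hp, hsp, List.modifyHead]

theorem splitOn_eq_sp (c0 : Char) (sep l : List Char) :
    PySem.Chars.splitOn l (c0 :: sep) = sp c0 sep l := by
  rw [PySem.Chars.splitOn, splitOn_go_eq c0 sep _ _ _ _ (by omega)]
  cases h : sp c0 sep l <;> simp [List.modifyHead]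

theorem join_cons_head (new : List Char) (c : Char) (h : List Char) (t : List (List Char)) :
    PySem.Chars.join new ((c :: h) :: t) = c :: PySem.Chars.join new (h :: t) := by
  cases t with
  | nil => simp [PySem.Chars.join, List.intercalate]
  | cons q r => rw [PySem.Chars.join_cons_cons, PySem.Chars.join_cons_cons]; simp

theorem replace_go_eq (c0 : Char) (sep new : List Char) :
    ∀ (fuel : Nat) (l acc : List Char), l.length ≤ fuel →
    PySem.Chars.replace.go (c0 :: sep) new fuel l acc
      = acc.reverse ++ PySem.Chars.join new (sp c0 sep l) := by
  intro fuel
  induction fuel with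
  | zero =>
    intro l acc h
    have : l = [] := by cases l <;> simp_all
    subst this
    simp [PySem.Chars.replace.go, sp, PySem.Chars.join, List.intercalate]
  | succ f ih =>
    intro l acc h
    cases l with
    | nil => simp [PySem.Chars.replace.go, sp, PySem.Chars.join, List.intercalate]
    | cons c rest =>
      by_cases hp : (c0 :: sep).isPrefixOf (c :: rest) = true
      · rw [PySem.Chars.replace.go, if_pos hp]
        rw [ih _ _ (by simp at h ⊢; omega)]
        obtain ⟨a, t, hsp⟩ : ∃ a t, sp c0 sep (List.drop sep.length rest) = a :: t := by
          cases hh : sp c0 sep (List.drop sep.length rest) with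
          | nil => exact absurd hh (sp_ne_nil c0 sep _)
          | cons a t => exact ⟨a, t, rfl⟩
        simp only [sp, if_pos hp, hsp, PySem.Chars.join_cons_cons]
        simp [hsp]
      · rw [PySem.Chars.replace.go, if_neg hp]
        rw [ih _ _ (by simp at h ⊢; omega)]
        obtain ⟨a, t, hsp⟩ : ∃ a t, sp c0 sep rest = a :: t := by
          cases hh : sp c0 sep rest with
          | nil => exact absurd hh (sp_ne_nil c0 sep rest)
          | cons a t => exact ⟨a, t, rfl⟩
        simp only [sp, if_neg hp, hsp, List.modifyHead]
        rw [join_cons_head]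
        simp

theorem replace_eq (c0 : Char) (sep new l : List Char) :
    PySem.Chars.replace l (c0 :: sep) new = PySem.Chars.join new (sp c0 sep l) := by
  rw [PySem.Chars.replace]
  simp only [List.isEmpty_cons]
  exact replace_go_eq c0 sep new _ _ _ (le_refl _)

theorem foldA (n : Int) :
    ∀ (ps : List String) (k : Int) (acc : String), ps ≠ [] → k + ps.length ≤ n →
    ((PySem.List.enumerate ps k).foldl
        (fun html_section ip =>
          html_section ++ ("<p>" ++ ip.2 ++ "</p>" ++ if ip.1 < n - 1 then "\n" else "")) acc).toList
      = acc.toList ++ "<p>".toList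
          ++ PySem.Chars.join "</p>\n<p>".toList (ps.map String.toList)
          ++ "</p>".toList
          ++ (if k + ps.length < n then "\n".toList else []) := by
  intro ps
  induction ps with
  | nil => intro k acc h; exact absurd rfl h
  | cons p rest ih =>
    intro k acc _ hle
    cases rest with
    | nil =>
      simp only [PySem.List.enumerate, List.foldl, String.toList_append, PySem.Chars.join,
        List.map, List.intercalate]
      simp only [List.length_cons, List.length_nil] at hle ⊢
      split_ifs with h1 h2 h2 <;> simp_all <;> omega
    | cons q rrest =>
      have hklt : k < n - 1 := by
        simp only [List.length_cons] at hle
        push_cast at hle; omega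
      rw [show PySem.List.enumerate (p :: q :: rrest) k
            = (k, p) :: PySem.List.enumerate (q :: rrest) (k + 1) from rfl]
      simp only [List.foldl]
      rw [ih (k + 1) _ (by simp) (by simp at hle ⊢; omega)]
      simp only [if_pos hklt, String.toList_append, List.map, PySem.Chars.join_cons_cons]
      have hsep : ("</p>\n<p>" : String).toList
          = "</p>".toList ++ "\n".toList ++ "<p>".toList := by decide
      rw [hsep]
      have hiff : (k + 1 + ((q :: rrest).length : Int) < n)
          ↔ (k + ((p :: q :: rrest).length : Int) < n) := by
        simp only [List.length_cons]; push_cast; omega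
      by_cases hc : k + ((p :: q :: rrest).length : Int) < n
      · rw [if_pos (hiff.mpr hc), if_pos hc]; simp
      · rw [if_neg (fun h => hc (hiff.mp h)), if_neg hc]; simp

-- ===== VERDICT (by name: the statement is the Claim_ definition above) =====
theorem format_section_to_html_spec : Claim_equal_format_section_to_html := by
  intro s _
  unfold Spec_format_section_to_html format_section_to_html format_section_to_html_alt
  have hnn : ("\n\n" : String).toList = '\n' :: ['\n'] := by decide
  have hsplit : PySem.Str.split? s "\n\n"
      = some ((PySem.Chars.splitOn s.toList ('\n' :: ['\n'])).map String.ofList) := by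
    rw [PySem.Str.split?, hnn, PySem.Chars.split?]
    simp
  rw [hsplit]
  simp only [Option.getD_some]
  apply String.toList_inj.mp
  set ps := (PySem.Chars.splitOn s.toList ('\n' :: ['\n'])).map String.ofList with hps
  have hpsne : ps ≠ [] := by
    rw [hps, splitOn_eq_sp]
    simp [sp_ne_nil]
  refine Eq.trans (foldA ((ps.length : Int)) ps 0 "" hpsne (by omega)) ?_
  have hmap : ps.map String.toList = sp '\n' ['\n'] s.toList := by
    rw [hps, splitOn_eq_sp, List.map_map]
    simp [Function.comp_def]
  rw [hmap]
  have hB : (PySem.Str.replace s "\n\n" "</p>\n<p>").toList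
      = PySem.Chars.join "</p>\n<p>".toList (sp '\n' ['\n'] s.toList) := by
    rw [PySem.Str.toList_replace, hnn, replace_eq]
  rw [String.toList_append, String.toList_append, hB]
  simp
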